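-- pv_equiv track=rewrite | github.com/rajendrapandey95/LeetCode | 2025/July 2025/1717. Maximum Score From Removing Substrings.py | _remove_pairs
-- ===== SOURCE A (Python) =====
-- def _remove_pairs(s: str, pair: str, points: int):
--     stack, count = [], 0
--     for ch in s:
--         if stack and stack[-1] == pair[0] and ch == pair[1]:
--             stack.pop()
--             count += 1
--         else:
--             stack.append(ch)
--     return count * points, "".join(stack)
-- ===== SOURCE B (Python) =====
-- def _remove_pairs(s, pair, points):
--     two = pair[0] + pair[1]
--     n = len(s)
--     while two in s:
--         s = s.replace(two, "")
--     return ((n - len(s)) // 2) * points, s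
-- ===== Notes on version B (the rewrite author's own statement) =====
-- stated objective: alternative
-- what changed: Replaces the single-pass stack scan with repeated whole-string `s.replace(pair[0]+pair[1], "")` until the pair no longer occurs (the length-2 deletion rule is confluent, so the fixed point equals the stack's reduced string), deriving the score from the total length shrinkage instead of counting removals during the pass.
-- outside the precondition, e.g. on _remove_pairs('', '', 5): A returns (0, ''), B raises IndexError; on _remove_pairs('xy', 'a', 3): A returns (0, 'xy'), B raises IndexError
import Mathlib
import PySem

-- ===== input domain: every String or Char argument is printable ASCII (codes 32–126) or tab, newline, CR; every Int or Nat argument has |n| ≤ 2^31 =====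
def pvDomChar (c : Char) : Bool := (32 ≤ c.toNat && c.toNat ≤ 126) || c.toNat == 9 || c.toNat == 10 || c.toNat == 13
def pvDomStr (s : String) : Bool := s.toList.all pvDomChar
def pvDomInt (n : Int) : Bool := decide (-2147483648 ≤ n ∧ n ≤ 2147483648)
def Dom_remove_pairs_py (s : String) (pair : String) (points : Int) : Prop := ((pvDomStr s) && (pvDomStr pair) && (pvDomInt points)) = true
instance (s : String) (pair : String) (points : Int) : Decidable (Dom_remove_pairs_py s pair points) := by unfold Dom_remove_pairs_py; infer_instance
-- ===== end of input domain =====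

-- B replaces A's single-pass stack scan by repeated `s = s.replace(pair[0]+pair[1], "")`
-- until the pair no longer occurs, deriving the score from the length shrinkage
-- (objective: alternative, naive-but-natural fixed-point strategy; confluence makes it exact).

-- ===== PORT A =====
-- stack kept in reversed order (head = Python's stack[-1]); joined back with .reverse at the end
def remove_pairs_py (s : String) (pair : String) (points : Int) : Int × String :=
  let r := s.toList.foldl (fun (st : List Char × Int) ch =>
      if st.1 ≠ [] ∧ st.1.head? = some ((PySem.Str.pyGet? pair 0).getD ' ')
           ∧ ch = (PySem.Str.pyGet? pair 1).getD ' ' then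
        (st.1.tail, st.2 + 1)
      else (ch :: st.1, st.2)) ([], 0)
  (r.2 * points, String.mk r.1.reverse)

-- ===== PORT B =====
-- helpers the port needs for its termination proof: a characterisation of
-- PySem.Chars.replace with a two-char pattern and empty replacement
def pvDel2 (a b : Char) : List Char → List Char
  | [] => []
  | [c] => [c]
  | c :: d :: t => if c = a ∧ d = b then pvDel2 a b t else c :: pvDel2 a b (d :: t)

theorem pvGo_eq (a b : Char) : ∀ (fuel : Nat) (l acc : List Char), l.length ≤ fuel →
    PySem.Chars.replace.go [a, b] [] fuel l acc = acc.reverse ++ pvDel2 a b l := by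
  intro fuel
  induction fuel with
  | zero =>
    intro l acc h
    have : l = [] := List.length_eq_zero_iff.mp (Nat.le_zero.mp h)
    subst this; simp [PySem.Chars.replace.go, pvDel2]
  | succ n ih =>
    intro l acc h
    match l with
    | [] => simp [PySem.Chars.replace.go, pvDel2]
    | [c] =>
      have hpre : ([a, b].isPrefixOf [c]) = false := by simp [List.isPrefixOf]
      rw [show PySem.Chars.replace.go [a, b] [] (n + 1) [c] acc
            = PySem.Chars.replace.go [a, b] [] n [] (c :: acc) from by
        simp [PySem.Chars.replace.go, hpre]]
      rw [ih [] (c :: acc) (by simp)]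
      simp [pvDel2]
    | c :: d :: t =>
      by_cases hc : c = a ∧ d = b
      · have hpre : ([a, b].isPrefixOf (c :: d :: t)) = true := by
          simp [List.isPrefixOf, hc.1, hc.2]
        rw [show PySem.Chars.replace.go [a, b] [] (n + 1) (c :: d :: t) acc
              = PySem.Chars.replace.go [a, b] [] n t acc from by
          simp [PySem.Chars.replace.go, hpre]]
        rw [ih t acc (by simp at h; omega)]
        simp only [pvDel2, if_pos hc]
      · have hpre : ([a, b].isPrefixOf (c :: d :: t)) = false := by
          simp [List.isPrefixOf]
          intro h1 h2; exact hc ⟨h1.symm, h2.symm⟩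
        rw [show PySem.Chars.replace.go [a, b] [] (n + 1) (c :: d :: t) acc
              = PySem.Chars.replace.go [a, b] [] n (d :: t) (c :: acc) from by
          simp [PySem.Chars.replace.go, hpre]]
        rw [ih (d :: t) (c :: acc) (by simp at h ⊢; omega)]
        simp [pvDel2, hc]

theorem pvReplace_two_eq (a b : Char) (l : List Char) :
    PySem.Chars.replace l [a, b] [] = pvDel2 a b l := by
  simp only [PySem.Chars.replace, List.isEmpty_cons, Bool.false_eq_true, if_false]
  exact pvGo_eq a b l.length l [] le_rfl

theorem pvDel2_length_le (a b : Char) : ∀ (n : Nat) (l : List Char), l.length ≤ n →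
    (pvDel2 a b l).length ≤ l.length := by
  intro n
  induction n with
  | zero =>
    intro l h
    have : l = [] := List.length_eq_zero_iff.mp (Nat.le_zero.mp h)
    subst this; simp [pvDel2]
  | succ m ih =>
    intro l h
    match l with
    | [] => simp [pvDel2]
    | [c] => simp [pvDel2]
    | c :: d :: t =>
      by_cases hc : c = a ∧ d = b
      · simp only [pvDel2, if_pos hc]
        have := ih t (by simp at h; omega)
        simp; omega
      · simp only [pvDel2, if_neg hc]
        have := ih (d :: t) (by simp at h ⊢; omega)
        simp at this ⊢; omega

theorem pvDel2_length_lt (a b : Char) : ∀ (n : Nat) (l : List Char), l.length ≤ n →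
    [a, b] <:+: l → (pvDel2 a b l).length < l.length := by
  intro n
  induction n with
  | zero =>
    intro l h hinf
    have : l = [] := List.length_eq_zero_iff.mp (Nat.le_zero.mp h)
    subst this; exact absurd (List.eq_nil_of_infix_nil hinf) (by simp)
  | succ m ih =>
    intro l h hinf
    match l with
    | [] => exact absurd (List.eq_nil_of_infix_nil hinf) (by simp)
    | [c] =>
      have := hinf.length_le; simp at this
    | c :: d :: t =>
      by_cases hc : c = a ∧ d = b
      · simp only [pvDel2, if_pos hc]
        have := pvDel2_length_le a b t.length t le_rfl
        simp; omega
      · have hdt : [a, b] <:+: d :: t := by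
          rcases List.infix_cons_iff.mp hinf with hp | hi
          · rcases List.cons_prefix_cons.mp hp with ⟨h1, hp2⟩
            rcases List.cons_prefix_cons.mp hp2 with ⟨h2, _⟩
            exact absurd ⟨h1.symm, h2.symm⟩ hc
          · exact hi
        simp only [pvDel2, if_neg hc]
        have := ih (d :: t) (by simp at h ⊢; omega) hdt
        simp at this ⊢; omega

-- the `while two in s: s = s.replace(two, "")` loop
def pvAltLoop (a b : Char) (cur : List Char) : List Char :=
  if PySem.Chars.isIn [a, b] cur = true then
    pvAltLoop a b (PySem.Chars.replace cur [a, b] [])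
  else cur
termination_by cur.length
decreasing_by
  rw [pvReplace_two_eq]
  exact pvDel2_length_lt a b cur.length cur le_rfl ((PySem.Chars.isIn_iff_infix _ _).mp (by assumption))

def remove_pairs_py_alt (s : String) (pair : String) (points : Int) : Int × String :=
  let a := (PySem.Str.pyGet? pair 0).getD ' '
  let b := (PySem.Str.pyGet? pair 1).getD ' '
  let n : Int := PySem.Str.len s
  let res := pvAltLoop a b s.toList
  (PySem.Int.floordiv (n - (res.length : Int)) 2 * points, String.mk res)

-- ===== PRECONDITION & SPEC =====
-- Pre_ excludes pairs with fewer than two characters: there Python A raises IndexError on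
-- most inputs but still returns when it never consults the missing index, while B always raises.
def Pre_remove_pairs_py (s : String) (pair : String) (points : Int) : Prop :=
  2 ≤ pair.toList.length
instance (s : String) (pair : String) (points : Int) : Decidable (Pre_remove_pairs_py s pair points) := by unfold Pre_remove_pairs_py; infer_instance

def pvWitness_remove_pairs_py : String × String × Int := ("cabxaby", "ab", 3)

def Spec_remove_pairs_py (s : String) (pair : String) (points : Int) (out : Int × String) : Prop := out = remove_pairs_py_alt s pair points
instance (s : String) (pair : String) (points : Int) (out : Int × String) : Decidable (Spec_remove_pairs_py s pair points out) := by unfold Spec_remove_pairs_py; infer_instance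

-- ===== CLAIM (what is proved, stated in full; the proofs are below) =====
def Claim_equal_remove_pairs_py : Prop := ∀ (s : String) (pair : String) (points : Int), Dom_remove_pairs_py s pair points → Pre_remove_pairs_py s pair points → Spec_remove_pairs_py s pair points (remove_pairs_py s pair points)

-- ===== LEMMAS AND PROOFS =====

-- the stack transition of A, stack-only
def pvStep (a b : Char) (st : List Char) (ch : Char) : List Char :=
  if st ≠ [] ∧ st.head? = some a ∧ ch = b then st.tail else ch :: st

def pvRun (a b : Char) (st : List Char) (s : List Char) : List Char := s.foldl (pvStep a b) st

-- A's fold: its stack is pvRun, and twice its count is the length A consumed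
theorem pvFoldA (a b : Char) : ∀ (s : List Char) (st : List Char) (c : Int),
    (s.foldl (fun (st2 : List Char × Int) ch =>
        if st2.1 ≠ [] ∧ st2.1.head? = some a ∧ ch = b then (st2.1.tail, st2.2 + 1)
        else (ch :: st2.1, st2.2)) (st, c)).1 = pvRun a b st s ∧
    2 * (s.foldl (fun (st2 : List Char × Int) ch =>
        if st2.1 ≠ [] ∧ st2.1.head? = some a ∧ ch = b then (st2.1.tail, st2.2 + 1)
        else (ch :: st2.1, st2.2)) (st, c)).2 + ((pvRun a b st s).length : Int)
      = 2 * c + (st.length : Int) + (s.length : Int) := by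
  intro s
  induction s with
  | nil => intro st c; simp [pvRun]
  | cons ch t ih =>
    intro st c
    by_cases h : st ≠ [] ∧ st.head? = some a ∧ ch = b
    · have hst : st ≠ [] := h.1
      have hlen : st.tail.length + 1 = st.length := by
        cases st with | nil => exact absurd rfl hst | cons x xs => simp
      simp only [List.foldl_cons, if_pos h, pvRun, pvStep]
      have := ih st.tail (c + 1)
      simp only [pvRun] at this
      refine ⟨this.1, ?_⟩
      have h2 := this.2
      push_cast [List.length_cons] at h2 ⊢
      omega
    · simp only [List.foldl_cons, if_neg h, pvRun, pvStep]
      have := ih (ch :: st) c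
      simp only [pvRun] at this
      refine ⟨this.1, ?_⟩
      have h2 := this.2
      push_cast [List.length_cons] at h2 ⊢
      omega

-- the stack never contains the pair (reversed: [b,a]) adjacently
theorem pvStep_noBA (a b : Char) (st : List Char) (ch : Char) (h : ¬ [b, a] <:+: st) :
    ¬ [b, a] <:+: pvStep a b st ch := by
  unfold pvStep
  split_ifs with hc
  · intro hinf
    exact h (hinf.trans (List.tail_suffix st).isInfix)
  · intro hinf
    rcases List.infix_cons_iff.mp hinf with hp | hi
    · rcases List.cons_prefix_cons.mp hp with ⟨hb, hp2⟩
      have hsta : st.head? = some a ∧ st ≠ [] := by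
        cases st with
        | nil => exact absurd hp2.length_le (by simp)
        | cons x xs =>
          rcases List.cons_prefix_cons.mp hp2 with ⟨ha, _⟩
          exact ⟨by simp [ha], by simp⟩
      exact hc ⟨hsta.2, hsta.1, hb.symm⟩
    · exact h hi

-- deleting one occurrence of [a,b] mid-stream does not change the stack
theorem pvRun_cons2 (a b : Char) (st y : List Char) (h : ¬ [b, a] <:+: st) :
    pvRun a b st (a :: b :: y) = pvRun a b st y := by
  have hkey : pvStep a b (pvStep a b st a) b = st := by
    by_cases hc : st ≠ [] ∧ st.head? = some a ∧ a = b
    · obtain ⟨hne, hhd, hab⟩ := hc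
      match st, hne, hhd, h with
      | x :: xs, _, hhd, h =>
        have hx : x = a := by simpa using hhd
        have hxs : xs.head? ≠ some a := by
          intro hh
          match xs, hh with
          | y' :: ys, hh =>
            have hy : y' = a := by simpa using hh
            exact h ⟨[], ys, by simp [hx, hy, ← hab]⟩
        have hstep1 : pvStep a b (x :: xs) a = xs := by
          unfold pvStep
          rw [if_pos ⟨by simp, by simp [hx], hab⟩]
          simp
        have hstep2 : pvStep a b xs b = a :: xs := by
          unfold pvStep
          rw [if_neg (by rintro ⟨_, hh, _⟩; exact hxs hh)]
          rw [← hab]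
        rw [hstep1, hstep2, hx]
    · have hstep1 : pvStep a b st a = a :: st := by
        unfold pvStep; rw [if_neg hc]
      have hstep2 : pvStep a b (a :: st) b = st := by
        unfold pvStep
        rw [if_pos ⟨by simp, by simp, rfl⟩]
        simp
      rw [hstep1, hstep2]
  simp [pvRun, List.foldl_cons, hkey]

-- hence pvDel2 preserves the stack
theorem pvRun_del2 (a b : Char) : ∀ (n : Nat) (s : List Char), s.length ≤ n →
    ∀ st, ¬ [b, a] <:+: st → pvRun a b st (pvDel2 a b s) = pvRun a b st s := by
  intro n
  induction n with
  | zero =>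
    intro s hs st _
    have : s = [] := List.length_eq_zero_iff.mp (Nat.le_zero.mp hs)
    subst this; simp [pvDel2]
  | succ m ih =>
    intro s hs st hst
    match s with
    | [] => simp [pvDel2]
    | [c] => simp [pvDel2]
    | c :: d :: t =>
      by_cases hc : c = a ∧ d = b
      · obtain ⟨h1, h2⟩ := hc
        rw [h1, h2]
        have hdd : pvDel2 a b (a :: b :: t) = pvDel2 a b t := by simp [pvDel2]
        rw [hdd, pvRun_cons2 a b st t hst]
        exact ih t (by simp at hs; omega) st hst
      · simp only [pvDel2, if_neg hc]
        have : pvRun a b st (c :: pvDel2 a b (d :: t)) = pvRun a b (pvStep a b st c) (pvDel2 a b (d :: t)) := by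
          simp [pvRun]
        rw [this, ih (d :: t) (by simp at hs ⊢; omega) (pvStep a b st c) (pvStep_noBA a b st c hst)]
        simp [pvRun]

-- on a pair-free string the stack just accumulates everything
theorem pvRun_fix (a b : Char) : ∀ (u st : List Char), ¬ [a, b] <:+: (st.reverse ++ u) →
    pvRun a b st u = u.reverse ++ st := by
  intro u
  induction u with
  | nil => intro st _; simp [pvRun]
  | cons c t ih =>
    intro st h
    have hc : ¬ (st ≠ [] ∧ st.head? = some a ∧ c = b) := by
      rintro ⟨hne, hhd, hcb⟩
      cases st with
      | nil => exact absurd rfl hne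
      | cons x xs =>
        have hx : x = a := by simpa using hhd
        subst hx; subst hcb
        exact h ⟨xs.reverse, t, by simp⟩
    have : pvRun a b st (c :: t) = pvRun a b (c :: st) t := by
      simp [pvRun, pvStep, hc]
    rw [this, ih (c :: st) (by simpa using h)]
    simp

theorem pvAltLoop_runS (a b : Char) : ∀ (n : Nat) (s : List Char), s.length ≤ n →
    pvRun a b [] (pvAltLoop a b s) = pvRun a b [] s := by
  intro n
  induction n with
  | zero =>
    intro s hs
    have : s = [] := List.length_eq_zero_iff.mp (Nat.le_zero.mp hs)
    subst this
    have hfalse : PySem.Chars.isIn [a, b] ([] : List Char) = false :=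
      (PySem.Chars.isIn_eq_false_iff _ _).mpr (fun hh => absurd (List.eq_nil_of_infix_nil hh) (by simp))
    rw [pvAltLoop]
    simp [hfalse]
  | succ m ih =>
    intro s hs
    rw [pvAltLoop]
    split_ifs with h
    · have hinf := (PySem.Chars.isIn_iff_infix _ _).mp h
      rw [pvReplace_two_eq]
      rw [ih (pvDel2 a b s) (by have := pvDel2_length_lt a b s.length s le_rfl hinf; omega)]
      exact pvRun_del2 a b s.length s le_rfl [] (by intro hh; exact absurd (List.eq_nil_of_infix_nil hh) (by simp))
    · rfl

theorem pvAltLoop_fix (a b : Char) : ∀ (n : Nat) (s : List Char), s.length ≤ n →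
    PySem.Chars.isIn [a, b] (pvAltLoop a b s) = false := by
  intro n
  induction n with
  | zero =>
    intro s hs
    have : s = [] := List.length_eq_zero_iff.mp (Nat.le_zero.mp hs)
    subst this
    have hfalse : PySem.Chars.isIn [a, b] ([] : List Char) = false :=
      (PySem.Chars.isIn_eq_false_iff _ _).mpr (fun hh => absurd (List.eq_nil_of_infix_nil hh) (by simp))
    rw [pvAltLoop]
    simp [hfalse]
  | succ m ih =>
    intro s hs
    rw [pvAltLoop]
    split_ifs with h
    · have hinf := (PySem.Chars.isIn_iff_infix _ _).mp h
      rw [pvReplace_two_eq]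
      exact ih (pvDel2 a b s) (by have := pvDel2_length_lt a b s.length s le_rfl hinf; omega)
    · simpa using h

-- ===== VERDICT (by name: the statement is the Claim_ definition above) =====
theorem remove_pairs_py_spec : Claim_equal_remove_pairs_py := by
  unfold Claim_equal_remove_pairs_py
  intro s pair points _ _
  unfold Spec_remove_pairs_py remove_pairs_py remove_pairs_py_alt
  set a := (PySem.Str.pyGet? pair 0).getD ' ' with ha
  set b := (PySem.Str.pyGet? pair 1).getD ' ' with hb
  set F := pvAltLoop a b s.toList with hF
  have hfold := pvFoldA a b s.toList [] 0
  have hrun : pvRun a b [] F = pvRun a b [] s.toList :=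
    pvAltLoop_runS a b s.toList.length s.toList le_rfl
  have hfree : ¬ [a, b] <:+: F := by
    have := pvAltLoop_fix a b s.toList.length s.toList le_rfl
    rw [← hF] at this
    exact (PySem.Chars.isIn_eq_false_iff _ _).mp this
  have hFfix : pvRun a b [] F = F.reverse := by
    have := pvRun_fix a b F [] (by simpa using hfree)
    simpa using this
  have hFeq : F = (pvRun a b [] s.toList).reverse := by
    rw [← hrun, hFfix, List.reverse_reverse]
  have hstr : (s.toList.foldl (fun (st2 : List Char × Int) ch =>
        if st2.1 ≠ [] ∧ st2.1.head? = some a ∧ ch = b then (st2.1.tail, st2.2 + 1)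
        else (ch :: st2.1, st2.2)) ([], 0)).1.reverse = F := by
    rw [hfold.1, hFeq]
  have hcnt := hfold.2
  simp only [List.length_nil, Nat.cast_zero, mul_zero, zero_add, Int.natCast_zero] at hcnt
  have hlenF : (F.length : Int) = ((pvRun a b [] s.toList).length : Int) := by
    rw [hFeq]; simp
  have hn : PySem.Str.len s = (s.toList.length : Int) := by
    simp [PySem.Str.len, PySem.Chars.len]
  refine Prod.ext ?_ ?_
  · show _ * points = PySem.Int.floordiv _ 2 * points
    have h2 : PySem.Str.len s - (F.length : Int)
        = 2 * (s.toList.foldl (fun (st2 : List Char × Int) ch =>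
            if st2.1 ≠ [] ∧ st2.1.head? = some a ∧ ch = b then (st2.1.tail, st2.2 + 1)
            else (ch :: st2.1, st2.2)) ([], 0)).2 := by
      rw [hn, hlenF]; omega
    rw [h2, PySem.Int.floordiv_eq_ediv_of_pos (by omega)]
    rw [Int.mul_ediv_cancel_left _ (by omega)]
  · show String.mk _ = String.mk _
    rw [hstr]
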